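-- pv_equiv track=rewrite | github.com/wiz21b/koi | koi/charts/indicators_service.py | to_arrays
-- ===== SOURCE A (Python) =====
-- def to_arrays(series):
--     """ Convert a serie of (x,y,value) tuple in three arrays :
--     - an array with all the distinct values for x
--     - an array with all the distinct values for y
--     - a 2D array with all the values ordered around the x,y axis.
--     """
--
--
--     # Associate indices to axis values
--
--     x_headers = dict()
--     y_headers = dict()
--
--     for x,y,v in series:
--         if not x in x_headers:
--             x_headers[x] = len(x_headers)
--
--         if not y in y_headers:
--             y_headers[y] = len(y_headers)
--
--     # Make sure the indices of the y axis are sorted.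
--     i = 0
--     for k in sorted(y_headers.keys()):
--         y_headers[k] = i
--         i += 1
--
--
--     array = [[0 for i in range(len(y_headers))] for j in range(len(x_headers))]
--
--     for x,y,v in series:
--         array[x_headers[x]][y_headers[y]] = v
--
--     legends = [item[0] for item in sorted( x_headers.items(), key=lambda a:a[1])]
--
--     x_legends = sorted(y_headers)
--
--     # for h,ndx in x_headers.iteritems():
--     #     array[1+ndx][0] = str(h)
--
--     # for h,ndx in y_headers.iteritems():
--     #     array[0][1+ndx] = str(h)
--
--
--
--     return x_legends, legends ,array
-- ===== SOURCE B (Python) =====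
-- def to_arrays(series):
--     """Group the series into a dict of per-x row dicts keyed by actual axis
--     values (no integer index maps, no pre-allocated grid), then read the grid
--     out of these row dicts along the sorted y keys."""
--     rows = {}
--     ys = set()
--     for x, y, v in series:
--         rows.setdefault(x, {})[y] = v
--         ys.add(y)
--     y_keys = sorted(ys)
--     array = [[row.get(y, 0) for y in y_keys] for row in rows.values()]
--     return y_keys, list(rows), array
-- ===== Notes on version B (the rewrite author's own statement) =====
-- stated objective: alternative
-- what changed: B drops A's integer index maps, index-reassignment loop and pre-allocated mutated grid entirely: one pass groups the series into a dict of per-x row dicts keyed by the actual y values (plus a y set), and the grid is read back by mapping each row dict along the sorted y keys with row.get(y, 0).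
import Mathlib
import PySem

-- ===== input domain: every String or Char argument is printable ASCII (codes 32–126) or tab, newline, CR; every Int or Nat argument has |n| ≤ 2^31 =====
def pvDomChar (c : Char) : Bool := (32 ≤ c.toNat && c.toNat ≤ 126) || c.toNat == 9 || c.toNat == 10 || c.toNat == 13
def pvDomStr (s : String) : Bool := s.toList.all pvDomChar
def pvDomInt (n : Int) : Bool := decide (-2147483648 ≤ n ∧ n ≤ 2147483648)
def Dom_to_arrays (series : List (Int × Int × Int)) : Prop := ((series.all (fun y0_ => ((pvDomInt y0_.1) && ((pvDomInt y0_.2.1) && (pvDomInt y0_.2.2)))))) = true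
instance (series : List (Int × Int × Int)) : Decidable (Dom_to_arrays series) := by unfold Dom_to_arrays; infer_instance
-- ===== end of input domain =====

-- B drops A's integer index maps and pre-allocated mutated grid: it groups the series into
-- per-x row dicts keyed by the actual y values and reads the grid back along the sorted y keys
-- (objective: alternative).

-- ===== PORT A =====
def to_arrays (series : List (Int × Int × Int)) : List Int × List Int × List (List Int) :=
  -- for x,y,v in series: grow both header dicts
  let hs := series.foldl
    (fun (st : PySem.Dict Int Int × PySem.Dict Int Int) t =>
      ((if st.1.contains t.1 then st.1 else st.1.insert t.1 (st.1.size : Int)),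
       (if st.2.contains t.2.1 then st.2 else st.2.insert t.2.1 (st.2.size : Int))))
    (PySem.Dict.empty, PySem.Dict.empty)
  let x_headers := hs.1
  -- i = 0; for k in sorted(y_headers.keys()): y_headers[k] = i; i += 1
  let yst := (PySem.List.sorted hs.2.keys (fun k => k)).foldl
    (fun (st : PySem.Dict Int Int × Int) k => (st.1.insert k st.2, st.2 + 1)) (hs.2, 0)
  let y_headers := yst.1
  let array0 : List (List Int) :=
    (PySem.List.pyRange 0 (x_headers.size : Int)).map
      (fun _ => (PySem.List.pyRange 0 (y_headers.size : Int)).map (fun _ => (0 : Int)))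
  -- array[x_headers[x]][y_headers[y]] = v  (the keys are always present, so d[k] = getD k 0,
  -- and both indices are always in range, so []= / [] are pySetD / pyGetD; exact here)
  let array := series.foldl
    (fun g t =>
      PySem.List.pySetD g (x_headers.getD t.1 0)
        (PySem.List.pySetD (PySem.List.pyGetD g (x_headers.getD t.1 0) [])
          (y_headers.getD t.2.1 0) t.2.2))
    array0
  let legends := (PySem.List.sorted x_headers.items (fun p => p.2)).map (fun p => p.1)
  let x_legends := PySem.List.sorted y_headers.keys (fun k => k)
  (x_legends, legends, array)

-- ===== PORT B =====
def to_arrays_alt (series : List (Int × Int × Int)) : List Int × List Int × List (List Int) :=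
  -- for x,y,v in series: rows.setdefault(x, {})[y] = v; ys.add(y)
  let st := series.foldl
    (fun (st : PySem.Dict Int (PySem.Dict Int Int) × PySem.Set Int) t =>
      (st.1.insert t.1 ((st.1.getD t.1 PySem.Dict.empty).insert t.2.1 t.2.2),
       st.2.add t.2.1))
    (PySem.Dict.empty, PySem.Set.empty)
  let rows := st.1
  let y_keys := PySem.List.sorted st.2 (fun y => y)
  -- [[row.get(y, 0) for y in y_keys] for row in rows.values()]
  let array := rows.values.map (fun row => y_keys.map (fun y => row.getD y 0))
  (y_keys, rows.keys, array)

-- ===== PRECONDITION & SPEC =====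
def Spec_to_arrays (series : List (Int × Int × Int)) (out : List Int × List Int × List (List Int)) : Prop := out = to_arrays_alt series
instance (series : List (Int × Int × Int)) (out : List Int × List Int × List (List Int)) : Decidable (Spec_to_arrays series out) := by unfold Spec_to_arrays; infer_instance

-- ===== CLAIM (what is proved, stated in full; the proofs are below) =====
def Claim_equal_to_arrays : Prop := ∀ (series : List (Int × Int × Int)), Dom_to_arrays series → Spec_to_arrays series (to_arrays series)

-- ===== LEMMAS AND PROOFS =====

-- proof-only helpers: {x: i for i, x in enumerate(keys)} (A's header dicts normalise to this)
def pvIdxDict (l : List Int) : PySem.Dict Int Int :=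
  (PySem.List.enumerate l).foldl (fun d p => d.insert p.2 p.1) PySem.Dict.empty

-- proof-only helper: B's row dict for a given x, as a fold over the matching tuples
def pvRowFold (series : List (Int × Int × Int)) (x : Int) : PySem.Dict Int Int :=
  (series.filter (fun t => t.1 == x)).foldl (fun d t => d.insert t.2.1 t.2.2) PySem.Dict.empty

-- updating a set with elements it already has changes nothing
theorem pv_update_of_mem (l : List Int) : ∀ (s : PySem.Set Int), (∀ x ∈ l, x ∈ s) →
    PySem.Set.update s l = s := by
  induction l with
  | nil => intro s _; rfl
  | cons a t ih =>
    intro s h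
    show PySem.Set.update (s.add a) t = s
    rw [PySem.Set.add_of_mem (h a (by simp))]
    exact ih s (fun x hx => h x (by simp [hx]))

-- lookup in an enumerate-built index dict
theorem pv_getD_enumFold (L : List Int) : ∀ (s : Int) (d : PySem.Dict Int Int) (k dflt : Int),
    L.Nodup →
    ((PySem.List.enumerate L s).foldl (fun d p => d.insert p.2 p.1) d).getD k dflt
      = if k ∈ L then s + (L.idxOf k : Int) else d.getD k dflt := by
  induction L with
  | nil => intro s d k dflt _; simp [PySem.List.enumerate_nil]
  | cons a t ih =>
    intro s d k dflt hnd
    rw [PySem.List.enumerate_cons]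
    simp only [List.foldl_cons]
    rw [ih (s+1) (d.insert a s) k dflt hnd.of_cons]
    by_cases hk : k = a
    · subst hk
      have : k ∉ t := (List.nodup_cons.mp hnd).1
      simp [this, List.idxOf_cons_self]
    · by_cases hkt : k ∈ t
      · simp only [hkt, if_pos, hk, or_true, List.mem_cons]
        rw [List.idxOf_cons_ne _ (fun h => hk h.symm)]
        push_cast
        ring
      · simp [hkt, hk, PySem.Dict.getD_insert]

-- keys of an enumerate-built index dict
theorem pv_keys_enumFold (L : List Int) (s : Int) (d : PySem.Dict Int Int) :
    ((PySem.List.enumerate L s).foldl (fun d p => d.insert p.2 p.1) d).keys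
      = PySem.Set.update d.keys L := by
  have := PySem.Dict.keys_foldl_insert_key (ν := Int) (PySem.List.enumerate L s)
    (fun p => p.2) (fun _ p => p.1) d
  rw [PySem.List.map_snd_enumerate] at this
  exact this

theorem pv_keys_idxDict (L : List Int) : (pvIdxDict L).keys = PySem.Set.ofList L := by
  rw [pvIdxDict, pv_keys_enumFold]
  rfl

theorem pv_items_idxDict (L : List Int) (h : L.Nodup) :
    (pvIdxDict L).items = (PySem.List.enumerate L).map (fun p => (p.2, p.1)) := by
  rw [pvIdxDict]
  have := PySem.Dict.items_foldl_insert_fresh (PySem.List.enumerate L)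
    (fun p => p.2) (fun p => p.1) PySem.Dict.empty
    (fun a _ => rfl) (by rw [PySem.List.map_snd_enumerate]; exact h)
  simpa using this

theorem pv_getD_idxDict (L : List Int) (h : L.Nodup) (k dflt : Int) :
    (pvIdxDict L).getD k dflt = if k ∈ L then (L.idxOf k : Int) else dflt := by
  rw [pvIdxDict, pv_getD_enumFold L 0 _ k dflt h]
  split <;> simp

theorem pv_size_idxDict (L : List Int) (h : L.Nodup) : (pvIdxDict L).size = L.length := by
  have : (pvIdxDict L).size = (pvIdxDict L).keys.length := by
    simp [PySem.Dict.size, PySem.Dict.keys]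
  rw [this, pv_keys_idxDict, PySem.Set.ofList_eq_self_of_nodup L h]

-- A's header-building fold is the index dict of the deduplicated list
theorem pv_headerFold (l : List Int) :
    l.foldl (fun d x => if d.contains x then d else d.insert x (d.size : Int)) PySem.Dict.empty
      = pvIdxDict (PySem.List.dedup l) := by
  induction l using List.reverseRecOn with
  | nil => rfl
  | append_singleton l x ih =>
    rw [List.foldl_append, List.foldl_cons, List.foldl_nil, ih]
    have hdd : PySem.List.dedup (l ++ [x])
        = if x ∈ PySem.List.dedup l then PySem.List.dedup l else PySem.List.dedup l ++ [x] := by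
      simp only [PySem.List.dedup_eq_ofList, PySem.Set.ofList_eq_foldl, List.foldl_append,
        List.foldl_cons, List.foldl_nil]
      rw [PySem.Set.add_eq_ite]
    have hnd : (PySem.List.dedup l).Nodup := by
      rw [PySem.List.dedup_eq_ofList]; exact PySem.Set.nodup_ofList l
    have hcont : ((pvIdxDict (PySem.List.dedup l)).contains x = true) ↔ x ∈ PySem.List.dedup l := by
      rw [PySem.Dict.contains_iff_mem_keys, pv_keys_idxDict]
      simp [PySem.Set.mem_ofList]
    by_cases hmem : x ∈ PySem.List.dedup l
    · rw [hdd, if_pos hmem, if_pos (hcont.mpr hmem)]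
    · rw [hdd, if_neg hmem, if_neg (fun h => hmem (hcont.mp h))]
      rw [pv_size_idxDict _ hnd]
      rw [pvIdxDict, pvIdxDict, PySem.List.enumerate_append, List.foldl_append]
      simp [PySem.List.enumerate_cons]

-- the reassignment loop's dict is an enumerate fold
theorem pv_reassign (L : List Int) : ∀ (d : PySem.Dict Int Int) (i : Int),
    L.foldl (fun (st : PySem.Dict Int Int × Int) k => (st.1.insert k st.2, st.2 + 1)) (d, i)
      = ((PySem.List.enumerate L i).foldl (fun d p => d.insert p.2 p.1) d, i + L.length) := by
  induction L with
  | nil => intro d i; simp [PySem.List.enumerate_nil]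
  | cons a t ih =>
    intro d i
    rw [List.foldl_cons, PySem.List.enumerate_cons]
    simp only [List.foldl_cons]
    rw [ih (d.insert a i) (i+1)]
    refine Prod.ext rfl ?_
    simp [List.length_cons]
    ring

-- the generic grid lemma: folding cell-writes into the dense table of a sparse dict
-- equals the dense table of the dict after the same writes
theorem pv_grid (nx ny : Nat) (ix iy : (Int × Int × Int) → Nat)
    (l : List (Int × Int × Int)) : ∀ (d : PySem.Dict (Int × Int) Int),
    (∀ t ∈ l, ix t < nx ∧ iy t < ny) →
    l.foldl
      (fun g t =>
        PySem.List.pySetD g ((ix t : Int))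
          (PySem.List.pySetD (PySem.List.pyGetD g ((ix t : Int)) [])
            ((iy t : Int)) t.2.2))
      ((PySem.List.pyRange 0 (nx : Int)).map
        (fun i => (PySem.List.pyRange 0 (ny : Int)).map (fun j => d.getD (i, j) 0)))
      = (PySem.List.pyRange 0 (nx : Int)).map
          (fun i => (PySem.List.pyRange 0 (ny : Int)).map
            (fun j => (l.foldl (fun d t => d.insert ((ix t : Int), (iy t : Int)) t.2.2) d).getD (i, j) 0)) := by
  induction l with
  | nil => intro d _; simp
  | cons t l ih =>
    intro d hb
    rw [List.foldl_cons, List.foldl_cons]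
    have hix := (hb t (by simp)).1
    have hiy := (hb t (by simp)).2
    have hrow : PySem.List.pyGetD
        ((PySem.List.pyRange 0 (nx : Int)).map
          (fun i => (PySem.List.pyRange 0 (ny : Int)).map (fun j => d.getD (i, j) 0)))
        ((ix t : Int)) []
        = (PySem.List.pyRange 0 (ny : Int)).map (fun j => d.getD (((ix t : Nat) : Int), j) 0) :=
      PySem.List.pyGetD_map_pyRange _ nx (ix t) [] hix
    rw [hrow]
    have hstep :
        PySem.List.pySetD
          ((PySem.List.pyRange 0 (nx : Int)).map
            (fun i => (PySem.List.pyRange 0 (ny : Int)).map (fun j => d.getD (i, j) 0)))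
          ((ix t : Int))
          (PySem.List.pySetD
            ((PySem.List.pyRange 0 (ny : Int)).map (fun j => d.getD (((ix t : Nat) : Int), j) 0))
            ((iy t : Int)) t.2.2)
        = (PySem.List.pyRange 0 (nx : Int)).map
            (fun i => (PySem.List.pyRange 0 (ny : Int)).map
              (fun j => (d.insert ((ix t : Int), (iy t : Int)) t.2.2).getD (i, j) 0)) := by
      rw [PySem.List.pySetD_natCast, PySem.List.pySetD_natCast]
      apply List.ext_getElem
      · simp
      · intro a h1 h2
        rw [List.getElem_set]
        by_cases ha : ix t = a
        · subst ha
          rw [if_pos rfl]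
          simp only [List.getElem_map, PySem.List.getElem_pyRange_one]
          apply List.ext_getElem
          · simp
          · intro b hb1 hb2
            rw [List.getElem_set]
            simp only [List.getElem_map, PySem.List.getElem_pyRange_one]
            have hblt : b < ny := by
              simpa [PySem.List.length_pyRange_one] using hb2
            by_cases hbj : iy t = b
            · subst hbj
              simp
            · rw [if_neg hbj, PySem.Dict.getD_insert, if_neg]
              · norm_num
              · intro hc
                rw [Prod.mk.injEq] at hc
                have : iy t = 0 + b := by exact_mod_cast hc.2.symm
                exact hbj (by omega)
        · rw [if_neg ha]
          simp only [List.getElem_map, PySem.List.getElem_pyRange_one]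
          apply List.ext_getElem
          · simp
          · intro b hb1 hb2
            simp only [List.getElem_map, PySem.List.getElem_pyRange_one]
            rw [PySem.Dict.getD_insert, if_neg]
            · intro hc
              rw [Prod.mk.injEq] at hc
              have h1 : ix t = 0 + a := by exact_mod_cast hc.1.symm
              exact ha (by omega)
    rw [hstep]
    exact ih _ (fun u hu => hb u (by simp [hu]))

-- A's first loop over series, split into its two independent dict folds
theorem pv_hsplit (series : List (Int × Int × Int)) :
    series.foldl
      (fun (st : PySem.Dict Int Int × PySem.Dict Int Int) t =>
        ((if st.1.contains t.1 then st.1 else st.1.insert t.1 (st.1.size : Int)),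
         (if st.2.contains t.2.1 then st.2 else st.2.insert t.2.1 (st.2.size : Int))))
      (PySem.Dict.empty, PySem.Dict.empty)
    = (pvIdxDict (PySem.List.dedup (series.map (fun t => t.1))),
       pvIdxDict (PySem.List.dedup (series.map (fun t => t.2.1)))) := by
  have h := PySem.List.foldl_prod_mk
    (fun d (t : Int × Int × Int) => if d.contains t.1 then d else d.insert t.1 (d.size : Int))
    (fun d (t : Int × Int × Int) => if d.contains t.2.1 then d else d.insert t.2.1 (d.size : Int))
    series PySem.Dict.empty PySem.Dict.empty
  refine h.trans ?_
  refine Prod.ext ?_ ?_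
  · exact (List.foldl_map).symm.trans (pv_headerFold (series.map (fun t => t.1)))
  · exact (List.foldl_map).symm.trans (pv_headerFold (series.map (fun t => t.2.1)))

-- B's grouping fold, looked up at x, is the row fold over the tuples with that x
theorem pv_rows_getD (series : List (Int × Int × Int)) : ∀ (d0 : PySem.Dict Int (PySem.Dict Int Int)) (x : Int),
    (series.foldl
      (fun (r : PySem.Dict Int (PySem.Dict Int Int)) t =>
        r.insert t.1 ((r.getD t.1 PySem.Dict.empty).insert t.2.1 t.2.2)) d0).getD x PySem.Dict.empty
    = (series.filter (fun t => t.1 == x)).foldl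
        (fun d t => d.insert t.2.1 t.2.2) (d0.getD x PySem.Dict.empty) := by
  induction series with
  | nil => intro d0 x; rfl
  | cons t rest ih =>
    intro d0 x
    rw [List.foldl_cons, ih]
    by_cases hx : t.1 = x
    · rw [List.filter_cons_of_pos (by simp [hx]), List.foldl_cons]
      congr 1
      rw [hx, PySem.Dict.getD_insert, if_pos rfl]
    · rw [List.filter_cons_of_neg (by simp [hx])]
      congr 1
      rw [PySem.Dict.getD_insert, if_neg (fun h => hx h.symm)]

-- point lemma: the sparse (f x, g y)-cell dict and the per-x row dict agree,
-- provided f and g separate the relevant values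
theorem pv_cell_point (l : List (Int × Int × Int)) (f g : Int → Int) (x y : Int) :
    ∀ (d0 : PySem.Dict (Int × Int) Int) (e0 : PySem.Dict Int Int),
    (∀ t ∈ l, (f t.1 = f x ↔ t.1 = x)) → (∀ t ∈ l, (g t.2.1 = g y ↔ t.2.1 = y)) →
    d0.getD (f x, g y) 0 = e0.getD y 0 →
    (l.foldl (fun d t => d.insert (f t.1, g t.2.1) t.2.2) d0).getD (f x, g y) 0
      = ((l.filter (fun t => t.1 == x)).foldl (fun d t => d.insert t.2.1 t.2.2) e0).getD y 0 := by
  induction l with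
  | nil => intro d0 e0 _ _ H; simpa using H
  | cons t rest ih =>
    intro d0 e0 hf hg H
    rw [List.foldl_cons]
    by_cases hx : t.1 = x
    · rw [List.filter_cons_of_pos (by simp [hx]), List.foldl_cons]
      refine ih _ _ (fun u hu => hf u (by simp [hu])) (fun u hu => hg u (by simp [hu])) ?_
      rw [PySem.Dict.getD_insert, PySem.Dict.getD_insert]
      by_cases hy : t.2.1 = y
      · rw [if_pos (by rw [hx, hy]), if_pos hy.symm]
      · rw [if_neg (fun hc => by
            rw [Prod.mk.injEq] at hc
            exact hy (((hg t (by simp)).mp hc.2.symm))), if_neg (fun h => hy h.symm)]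
        exact H
    · rw [List.filter_cons_of_neg (by simp [hx])]
      refine ih _ _ (fun u hu => hf u (by simp [hu])) (fun u hu => hg u (by simp [hu])) ?_
      rw [PySem.Dict.getD_insert, if_neg (fun hc => by
        rw [Prod.mk.injEq] at hc
        exact hx ((hf t (by simp)).mp hc.1.symm))]
      exact H

-- B's port in closed form
theorem pv_alt_eq (series : List (Int × Int × Int)) :
    to_arrays_alt series =
      (PySem.List.sorted (PySem.Set.ofList (series.map (fun t => t.2.1))) (fun y => y),
       PySem.Set.ofList (series.map (fun t => t.1)),
       (PySem.Set.ofList (series.map (fun t => t.1))).map (fun x =>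
         (PySem.List.sorted (PySem.Set.ofList (series.map (fun t => t.2.1))) (fun y => y)).map
           (fun y => (pvRowFold series x).getD y 0))) := by
  unfold to_arrays_alt
  rw [PySem.List.foldl_prod_mk
    (fun (r : PySem.Dict Int (PySem.Dict Int Int)) (t : Int × Int × Int) =>
      r.insert t.1 ((r.getD t.1 PySem.Dict.empty).insert t.2.1 t.2.2))
    (fun (s : PySem.Set Int) (t : Int × Int × Int) => s.add t.2.1)
    series PySem.Dict.empty PySem.Set.empty]
  have hys : series.foldl (fun (s : PySem.Set Int) (t : Int × Int × Int) => s.add t.2.1) PySem.Set.empty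
      = PySem.Set.ofList (series.map (fun t => t.2.1)) := by
    rw [PySem.Set.ofList_eq_foldl, List.foldl_map]
    rfl
  have hkeys : (series.foldl
      (fun (r : PySem.Dict Int (PySem.Dict Int Int)) t =>
        r.insert t.1 ((r.getD t.1 PySem.Dict.empty).insert t.2.1 t.2.2)) PySem.Dict.empty).keys
      = PySem.Set.ofList (series.map (fun t => t.1)) := by
    rw [PySem.Dict.keys_foldl_insert_key series (fun t => t.1)
      (fun r t => (r.getD t.1 PySem.Dict.empty).insert t.2.1 t.2.2) PySem.Dict.empty]
    rw [PySem.Set.ofList_eq_foldl]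
    rfl
  have hvals : (series.foldl
      (fun (r : PySem.Dict Int (PySem.Dict Int Int)) t =>
        r.insert t.1 ((r.getD t.1 PySem.Dict.empty).insert t.2.1 t.2.2)) PySem.Dict.empty).values
      = (PySem.Set.ofList (series.map (fun t => t.1))).map (fun x => pvRowFold series x) := by
    rw [PySem.Dict.values_eq_map_keys _ (by rw [hkeys]; exact PySem.Set.nodup_ofList _) PySem.Dict.empty,
      hkeys]
    refine List.map_congr_left (fun x _ => ?_)
    rw [pv_rows_getD]
    rfl
  dsimp only
  rw [hys, hkeys, hvals, List.map_map]
  rfl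

-- ===== VERDICT (by name: the statement is the Claim_ definition above) =====
theorem to_arrays_spec : Claim_equal_to_arrays := by
  intro series _
  unfold Spec_to_arrays to_arrays
  rw [pv_alt_eq, pv_hsplit]
  simp only [PySem.List.dedup_eq_ofList]
  have hnY0 : (PySem.Set.ofList (series.map (fun t => t.2.1))).Nodup := PySem.Set.nodup_ofList _
  rw [pv_reassign]
  simp only [pv_keys_idxDict, PySem.Set.ofList_eq_self_of_nodup _ hnY0]
  have hyk : ((PySem.List.enumerate
        (PySem.List.sorted (PySem.Set.ofList (series.map (fun t => t.2.1))) (fun k => k))).foldl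
        (fun d p => d.insert p.2 p.1)
        (pvIdxDict (PySem.Set.ofList (series.map (fun t => t.2.1))))).keys
      = PySem.Set.ofList (series.map (fun t => t.2.1)) := by
    rw [pv_keys_enumFold, pv_keys_idxDict, PySem.Set.ofList_eq_self_of_nodup _ hnY0]
    exact pv_update_of_mem _ _ (fun x hx => (PySem.List.mem_sorted _ _ _ _).mp hx)
  rw [hyk]
  have hnX : (PySem.Set.ofList (series.map (fun t => t.1))).Nodup := PySem.Set.nodup_ofList _
  have hnY : (PySem.List.sorted (PySem.Set.ofList (series.map (fun t => t.2.1))) (fun k => k)).Nodup :=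
    (PySem.List.sorted_perm _ _ _).nodup_iff.mpr hnY0
  -- legends = x keys in insertion order
  have hpw : ((PySem.List.enumerate (PySem.Set.ofList (series.map (fun t => t.1)))).map
      (fun p => (p.2, p.1))).Pairwise (fun a b : Int × Int => a.2 < b.2) :=
    List.Pairwise.map _ (fun _ _ h => h) (PySem.List.pairwise_lt_enumerate _ 0)
  have hleg : PySem.List.sorted (pvIdxDict (PySem.Set.ofList (series.map (fun t => t.1)))).items
      (fun p => p.2)
      = (PySem.List.enumerate (PySem.Set.ofList (series.map (fun t => t.1)))).map
          (fun p => (p.2, p.1)) := by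
    rw [pv_items_idxDict _ hnX]
    exact PySem.List.sorted_eq_of_perm_of_pairwise_lt _ _ _ (List.Perm.refl _) hpw
  rw [hleg, List.map_map]
  rw [show (fun (p : Int × Int) => p.1) ∘ (fun (p : Int × Int) => (p.2, p.1))
      = (fun (p : Int × Int) => p.2) from rfl]
  rw [PySem.List.map_snd_enumerate]
  refine Prod.ext rfl (Prod.ext rfl ?_)
  -- sizes
  have hsz : ∀ (d : PySem.Dict Int Int), d.size = d.keys.length := fun d => by simp [PySem.Dict.size, PySem.Dict.keys]
  have hysz : (List.foldl (fun d p => d.insert p.2 p.1) (pvIdxDict (PySem.Set.ofList (series.map (fun t => t.2.1))))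
      (PySem.List.enumerate (PySem.List.sorted (PySem.Set.ofList (series.map (fun t => t.2.1))) (fun k => k)))).size = (List.length (PySem.Set.ofList (series.map (fun t => t.2.1)))) := by rw [hsz, hyk]
  have hYlen : (List.length (PySem.List.sorted (PySem.Set.ofList (series.map (fun t => t.2.1))) (fun k => k))) = (List.length (PySem.Set.ofList (series.map (fun t => t.2.1)))) :=
    (PySem.List.sorted_perm _ _ _).length_eq
  rw [hysz, pv_size_idxDict _ hnX]
  -- index lookups become positions in the axis lists
  have hgx : ∀ t : Int × Int × Int, t ∈ series →
      (pvIdxDict (PySem.Set.ofList (series.map (fun t => t.1)))).getD t.1 0 = ((List.idxOf t.1 (PySem.Set.ofList (series.map (fun t => t.1))) : Nat) : Int) := by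
    intro t ht
    rw [pv_getD_idxDict _ hnX]
    rw [if_pos ((PySem.Set.mem_ofList _ _).mpr (List.mem_map_of_mem ht))]
  have hmY : ∀ t : Int × Int × Int, t ∈ series → t.2.1 ∈ (PySem.List.sorted (PySem.Set.ofList (series.map (fun t => t.2.1))) (fun k => k)) := by
    intro t ht
    exact (PySem.List.mem_sorted _ _ _ _).mpr
      ((PySem.Set.mem_ofList _ _).mpr (List.mem_map_of_mem ht))
  have hgyA : ∀ t : Int × Int × Int, t ∈ series →
      (List.foldl (fun d p => d.insert p.2 p.1) (pvIdxDict (PySem.Set.ofList (series.map (fun t => t.2.1))))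
      (PySem.List.enumerate (PySem.List.sorted (PySem.Set.ofList (series.map (fun t => t.2.1))) (fun k => k)))).getD t.2.1 0 = ((List.idxOf t.2.1 (PySem.List.sorted (PySem.Set.ofList (series.map (fun t => t.2.1))) (fun k => k)) : Nat) : Int) := by
    intro t ht
    rw [pv_getD_enumFold _ 0 _ _ _ hnY, if_pos (hmY t ht), zero_add]
  rw [PySem.List.foldl_congr_mem series _
    (fun g (t : Int × Int × Int) =>
      PySem.List.pySetD g (((List.idxOf t.1 (PySem.Set.ofList (series.map (fun t => t.1))) : Nat) : Int))
        (PySem.List.pySetD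
          (PySem.List.pyGetD g (((List.idxOf t.1 (PySem.Set.ofList (series.map (fun t => t.1))) : Nat) : Int)) [])
          (((List.idxOf t.2.1 (PySem.List.sorted (PySem.Set.ofList (series.map (fun t => t.2.1))) (fun k => k)) : Nat) : Int)) t.2.2)) _
    (fun acc t ht => by rw [hgx t ht, hgyA t ht])]
  have hb : ∀ t : Int × Int × Int, t ∈ series →
      List.idxOf t.1 (PySem.Set.ofList (series.map (fun t => t.1))) < List.length (PySem.Set.ofList (series.map (fun t => t.1))) ∧
      List.idxOf t.2.1 (PySem.List.sorted (PySem.Set.ofList (series.map (fun t => t.2.1))) (fun k => k)) < List.length (PySem.Set.ofList (series.map (fun t => t.2.1))) := by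
    intro t ht
    refine ⟨List.idxOf_lt_length_of_mem ((PySem.Set.mem_ofList _ _).mpr (List.mem_map_of_mem ht)), ?_⟩
    rw [← hYlen]
    exact List.idxOf_lt_length_of_mem (hmY t ht)
  have hg := pv_grid (List.length (PySem.Set.ofList (series.map (fun t => t.1)))) (List.length (PySem.Set.ofList (series.map (fun t => t.2.1))))
    (fun t => List.idxOf t.1 (PySem.Set.ofList (series.map (fun t => t.1))))
    (fun t => List.idxOf t.2.1 (PySem.List.sorted (PySem.Set.ofList (series.map (fun t => t.2.1))) (fun k => k)))
    series PySem.Dict.empty hb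
  have hempty : ∀ (i j : Int), (PySem.Dict.empty : PySem.Dict (Int × Int) Int).getD (i, j) 0 = 0 :=
    fun _ _ => rfl
  simp only [hempty] at hg
  rw [hg]
  -- grid: the dense table of the sparse cell dict = the row-dict table
  apply List.ext_getElem
  · simp [PySem.List.length_pyRange_one]
  · intro i h1 h2
    simp only [List.getElem_map, PySem.List.getElem_pyRange_one]
    have hiX : i < List.length (PySem.Set.ofList (series.map (fun t => t.1))) := by
      simpa [PySem.List.length_pyRange_one] using h1
    apply List.ext_getElem
    · simp [PySem.List.length_pyRange_one, hYlen]
    · intro j hj1 hj2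
      simp only [List.getElem_map, PySem.List.getElem_pyRange_one]
      have hjY : j < List.length (PySem.List.sorted (PySem.Set.ofList (series.map (fun t => t.2.1))) (fun k => k)) := by
        rw [hYlen]
        simpa [PySem.List.length_pyRange_one] using hj1
      -- names
      set X := PySem.Set.ofList (series.map (fun t => t.1)) with hX
      set Y := PySem.List.sorted (PySem.Set.ofList (series.map (fun t => t.2.1))) (fun k => k) with hY
      have hf : ∀ t ∈ series, ((List.idxOf t.1 X : Nat) : Int) = ((List.idxOf (X[i]'hiX) X : Nat) : Int) ↔ t.1 = X[i]'hiX := by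
        intro t ht
        constructor
        · intro h
          have hn : List.idxOf t.1 X = List.idxOf (X[i]'hiX) X := by exact_mod_cast h
          have h1m : t.1 ∈ X := (PySem.Set.mem_ofList _ _).mpr (List.mem_map_of_mem ht)
          have hidx : List.idxOf t.1 X = i := by rw [hn, hnX.idxOf_getElem i hiX]
          have h3 := List.getElem_idxOf (List.idxOf_lt_length_of_mem h1m)
          simp only [hidx] at h3
          exact h3.symm
        · intro h; rw [h]
      have hg' : ∀ t ∈ series, ((List.idxOf t.2.1 Y : Nat) : Int) = ((List.idxOf (Y[j]'hjY) Y : Nat) : Int) ↔ t.2.1 = Y[j]'hjY := by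
        intro t ht
        constructor
        · intro h
          have hn : List.idxOf t.2.1 Y = List.idxOf (Y[j]'hjY) Y := by exact_mod_cast h
          have h1m : t.2.1 ∈ Y := hmY t ht
          have hidx : List.idxOf t.2.1 Y = j := by rw [hn, hnY.idxOf_getElem j hjY]
          have h3 := List.getElem_idxOf (List.idxOf_lt_length_of_mem h1m)
          simp only [hidx] at h3
          exact h3.symm
        · intro h; rw [h]
      have hpt := pv_cell_point series
        (fun a => ((List.idxOf a X : Nat) : Int)) (fun b => ((List.idxOf b Y : Nat) : Int))
        (X[i]'hiX) (Y[j]'hjY) PySem.Dict.empty PySem.Dict.empty hf hg' rfl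
      simp only [hnX.idxOf_getElem i hiX, hnY.idxOf_getElem j hjY] at hpt
      rw [show ((0 : Int) + (i : Int)) = ((i : Nat) : Int) by ring,
          show ((0 : Int) + (j : Int)) = ((j : Nat) : Int) by ring]
      rw [hpt]
      rfl
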